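-- pv_equiv track=rewrite | github.com/HappynessI/verl-for-AgentGym | examples/sglang_multiturn/my_exp/eval/entropy_offline_minimax_traj.py | build_prefix_for_turn
-- ===== SOURCE A (Python) =====
-- from typing import Dict, List, Optional, Tuple, Any
--
-- def build_prefix_for_turn(conversations: List[Dict], turn_idx: int) -> List[Dict]:
--     """
--     构建到第 turn_idx 个 assistant turn 之前的消息上下文。
--     用于让小模型预测该 turn 的 token 分布。
--
--     conversations 格式: [user, assistant, user, assistant, ...]
--     turn_idx: 第几个 assistant turn（0-indexed）
--     """
--     prefix_messages = []
--     assistant_count = 0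
--     for msg in conversations:
--         if msg.get("role") == "assistant":
--             if assistant_count == turn_idx:
--                 break
--             assistant_count += 1
--         prefix_messages.append(msg)
--     return prefix_messages
-- ===== SOURCE B (Python) =====
-- def _cut_at(flags, remaining):
--     """Index of the flag where the countdown hits zero, or len(flags)."""
--     k = 0
--     for f in flags:
--         if f:
--             if remaining == 0:
--                 return k
--             remaining -= 1
--         k += 1
--     return k
--
-- def build_prefix_for_turn(conversations, turn_idx):
--     flags = [msg.get("role") == "assistant" for msg in conversations]
--     cut = _cut_at(flags, turn_idx)
--     return conversations[:cut]
-- ===== Notes on version B (the rewrite author's own statement) =====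
-- stated objective: alternative
-- what changed: Replaces A's single accumulate-while-scanning loop (counter + break + append) with two staged passes: first map each message to an is-assistant boolean, then compute the cut index where the turn_idx-th True occurs (falling back to the full length), and finally slice the conversation there.
import Mathlib
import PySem

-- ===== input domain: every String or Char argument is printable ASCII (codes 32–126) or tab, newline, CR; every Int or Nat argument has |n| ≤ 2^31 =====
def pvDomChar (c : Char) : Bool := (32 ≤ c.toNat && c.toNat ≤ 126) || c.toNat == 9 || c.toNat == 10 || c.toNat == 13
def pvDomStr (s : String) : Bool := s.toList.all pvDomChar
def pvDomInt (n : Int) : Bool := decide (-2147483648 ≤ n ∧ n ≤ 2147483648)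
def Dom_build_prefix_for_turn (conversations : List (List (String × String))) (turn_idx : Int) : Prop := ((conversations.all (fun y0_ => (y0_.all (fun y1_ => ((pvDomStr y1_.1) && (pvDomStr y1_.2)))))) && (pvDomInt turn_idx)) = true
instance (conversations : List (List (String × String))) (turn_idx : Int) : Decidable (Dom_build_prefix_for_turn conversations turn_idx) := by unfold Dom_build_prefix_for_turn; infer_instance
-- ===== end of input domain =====

-- B replaces A's accumulate-while-scanning loop (counter + break + append) with two staged
-- passes: map messages to is-assistant booleans, find the cut index, then slice there.


-- msg.get("role") on the association-list encoding of a Python dict: first match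
def pvRoleIsAssistant (msg : List (String × String)) : Bool :=
  (msg.find? (fun p => p.1 == "role")).map (·.2) == some "assistant"

-- ===== PORT A =====
-- the for-loop of A, with its `assistant_count` state and the `break`
def pvLoopA (msgs : List (List (String × String))) (assistant_count turn_idx : Int) :
    List (List (String × String)) :=
  match msgs with
  | [] => []
  | m :: rest =>
    if pvRoleIsAssistant m then
      if assistant_count = turn_idx then []
      else m :: pvLoopA rest (assistant_count + 1) turn_idx
    else m :: pvLoopA rest assistant_count turn_idx

def build_prefix_for_turn (conversations : List (List (String × String))) (turn_idx : Int) : List (List (String × String)) :=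
  pvLoopA conversations 0 turn_idx

-- ===== PORT B =====
-- _cut_at: the index (a Nat) at which the `remaining`-th True flag sits, else the length
def pvCutAt (flags : List Bool) (remaining : Int) : Nat :=
  match flags with
  | [] => 0
  | f :: rest =>
    if f then
      if remaining = 0 then 0
      else pvCutAt rest (remaining - 1) + 1
    else pvCutAt rest remaining + 1

def build_prefix_for_turn_alt (conversations : List (List (String × String))) (turn_idx : Int) : List (List (String × String)) :=
  let flags := conversations.map pvRoleIsAssistant
  let cut := pvCutAt flags turn_idx
  PySem.List.slice conversations none (some (cut : Int))

-- ===== PRECONDITION & SPEC =====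
def Spec_build_prefix_for_turn (conversations : List (List (String × String))) (turn_idx : Int) (out : List (List (String × String))) : Prop := out = build_prefix_for_turn_alt conversations turn_idx
instance (conversations : List (List (String × String))) (turn_idx : Int) (out : List (List (String × String))) : Decidable (Spec_build_prefix_for_turn conversations turn_idx out) := by unfold Spec_build_prefix_for_turn; infer_instance

-- ===== CLAIM (what is proved, stated in full; the proofs are below) =====
def Claim_equal_build_prefix_for_turn : Prop := ∀ (conversations : List (List (String × String))) (turn_idx : Int), Dom_build_prefix_for_turn conversations turn_idx → Spec_build_prefix_for_turn conversations turn_idx (build_prefix_for_turn conversations turn_idx)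

-- ===== LEMMAS AND PROOFS =====

lemma pvLoopA_eq_take (msgs : List (List (String × String))) :
    ∀ cnt t : Int,
      pvLoopA msgs cnt t = msgs.take (pvCutAt (msgs.map pvRoleIsAssistant) (t - cnt)) := by
  induction msgs with
  | nil => intro cnt t; rfl
  | cons m rest ih =>
    intro cnt t
    by_cases hA : pvRoleIsAssistant m
    · by_cases h0 : cnt = t
      · simp [pvLoopA, pvCutAt, hA, h0]
      · have hd : t - cnt ≠ 0 := by omega
        have heq : t - (cnt + 1) = t - cnt - 1 := by ring
        simp [pvLoopA, pvCutAt, hA, h0, hd, ih, heq]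
    · simp [pvLoopA, pvCutAt, hA, ih]

-- ===== VERDICT (by name: the statement is the Claim_ definition above) =====
theorem build_prefix_for_turn_spec : Claim_equal_build_prefix_for_turn := by
  intro conversations turn_idx _
  unfold Spec_build_prefix_for_turn build_prefix_for_turn build_prefix_for_turn_alt
  rw [pvLoopA_eq_take conversations 0 turn_idx]
  rw [PySem.List.slice_to _ (by positivity)]
  simp
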